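-- pv_equiv track=rewrite | github.com/maticstric/ecs235a-aes | toy.py | get_good_pair
-- ===== SOURCE A (Python) =====
-- SBOX = [0xe, 0x4, 0xd, 0x1, 0x2, 0xf, 0xb, 0x8, 0x3, 0xa, 0x6, 0xc, 0x5, 0x9, 0x0, 0x7]
--
-- KEY1 = 0x7
--
-- KEY2 = 0xe
--
-- def get_good_pair(sorted_differentials):
--     for differential in sorted_differentials:
--         for plain0 in range(16): # Chosing plain0 at "random"
--             plain1 = plain0 ^ differential[0]
--
--             cipher0 = encrypt(plain0)
--             cipher1 = encrypt(plain1)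
--
--             if cipher0 ^ cipher1 == differential[1]: # GOOD PAIR!
--                 return (plain0, plain1)
--
-- def encrypt(state):
--     state = add_round_key(state, KEY1)
--     state = sub(state)
--     state = add_round_key(state, KEY2)
--
--     return state
--
-- def sub(state):
--     return SBOX[state]
--
-- def add_round_key(state, key):
--     return state ^ key
-- ===== SOURCE B (Python) =====
-- SBOX = [0xe, 0x4, 0xd, 0x1, 0x2, 0xf, 0xb, 0x8, 0x3, 0xa, 0x6, 0xc, 0x5, 0x9, 0x0, 0x7]
--
-- KEY1 = 0x7
--
-- KEY2 = 0xe
--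
-- def encrypt(state):
--     return SBOX[state ^ KEY1] ^ KEY2
--
-- def _build_table():
--     # table[(in_diff, out_diff)] = smallest plain0 in 0..15 producing that output difference
--     table = {}
--     for d in range(16):
--         for p in range(16):
--             key = (d, encrypt(p) ^ encrypt(p ^ d))
--             if key not in table:
--                 table[key] = p
--     return table
--
-- _TABLE = _build_table()
--
-- def get_good_pair(sorted_differentials):
--     for differential in sorted_differentials:
--         p = _TABLE.get((differential[0], differential[1]))
--         if p is not None:
--             return (p, p ^ differential[0])
-- ===== Notes on version B (the rewrite author's own statement) =====
-- stated objective: faster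
-- what changed: B precomputes the cipher's difference-distribution table once (keyed by (input-diff, output-diff), keeping the smallest plaintext) and answers each differential by a single dict lookup, instead of A's fresh scan over 16 plaintexts with 32 encrypt calls per differential.
-- outside the precondition, e.g. on get_good_pair([(16, 0)]): A raises IndexError, B returns None; on get_good_pair([(-16, 0)]): A returns (0, -16), B returns None
import Mathlib
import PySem

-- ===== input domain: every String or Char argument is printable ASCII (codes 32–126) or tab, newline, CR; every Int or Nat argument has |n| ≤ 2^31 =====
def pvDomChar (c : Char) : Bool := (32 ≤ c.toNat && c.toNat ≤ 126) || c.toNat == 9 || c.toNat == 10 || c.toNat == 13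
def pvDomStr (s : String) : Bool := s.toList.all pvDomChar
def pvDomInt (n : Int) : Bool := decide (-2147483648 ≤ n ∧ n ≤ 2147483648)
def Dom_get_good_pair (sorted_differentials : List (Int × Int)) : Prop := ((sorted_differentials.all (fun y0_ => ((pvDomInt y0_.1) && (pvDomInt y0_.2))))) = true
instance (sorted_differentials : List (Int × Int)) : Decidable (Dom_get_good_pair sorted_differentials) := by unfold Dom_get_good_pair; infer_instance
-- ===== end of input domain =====

set_option maxRecDepth 10000
set_option maxHeartbeats 1000000

-- B replaces A's per-differential scan over 16 plaintexts by a difference-distribution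
-- table built once and an O(1) lookup per differential (objective: faster for long inputs).

-- ===== PORT A =====
def sboxA : List Int := [0xe, 0x4, 0xd, 0x1, 0x2, 0xf, 0xb, 0x8, 0x3, 0xa, 0x6, 0xc, 0x5, 0x9, 0x0, 0x7]

def add_round_keyA (state key : Int) : Int := PySem.Int.bxor state key

-- SBOX[state]: PySem.List.pyGet? is exact (none = IndexError, excluded by Pre_); .getD 0 only pads the type
def subA (state : Int) : Int := (PySem.List.pyGet? sboxA state).getD 0

def encryptA (state : Int) : Int :=
  add_round_keyA (subA (add_round_keyA state 0x7)) 0xe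

-- the inner 'for plain0 in range(16): … return' loop of A
def innerA (d0 d1 : Int) : Option (Int × Int) :=
  (PySem.List.pyRange 0 16 1).findSome? (fun plain0 =>
    let plain1 := PySem.Int.bxor plain0 d0
    if PySem.Int.bxor (encryptA plain0) (encryptA plain1) = d1 then some (plain0, plain1) else none)

def get_good_pair (sorted_differentials : List (Int × Int)) : Option (Int × Int) :=
  match sorted_differentials with
  | [] => none
  | differential :: rest =>
    match innerA differential.1 differential.2 with
    | some r => some r
    | none => get_good_pair rest

-- ===== PORT B =====
def sboxB : List Int := [0xe, 0x4, 0xd, 0x1, 0x2, 0xf, 0xb, 0x8, 0x3, 0xa, 0x6, 0xc, 0x5, 0x9, 0x0, 0x7]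

def encryptB (state : Int) : Int :=
  PySem.Int.bxor ((PySem.List.pyGet? sboxB (PySem.Int.bxor state 0x7)).getD 0) 0xe

-- _build_table(): table[(d, out_diff)] = smallest p in 0..15 producing it
def tableB : PySem.Dict (Int × Int) Int :=
  (PySem.List.pyRange 0 16 1).foldl (fun t d =>
    (PySem.List.pyRange 0 16 1).foldl (fun t p =>
      let key := (d, PySem.Int.bxor (encryptB p) (encryptB (PySem.Int.bxor p d)))
      if t.contains key then t else t.insert key p) t)
    PySem.Dict.empty

def get_good_pair_alt (sorted_differentials : List (Int × Int)) : Option (Int × Int) :=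
  sorted_differentials.findSome? (fun differential =>
    match tableB.get? (differential.1, differential.2) with
    | some p => some (p, PySem.Int.bxor p differential.1)
    | none => none)

-- ===== PRECONDITION & SPEC =====
-- Pre_ restricts input differences to the toy cipher's natural 4-bit domain 0..15: outside it A
-- raises IndexError (differential[0] ≥ 16 or < -16) or, for -16 ≤ differential[0] ≤ -1, returns a
-- pair only through Python's accidental negative-index wraparound into the S-box.
def Pre_get_good_pair (sorted_differentials : List (Int × Int)) : Prop :=
  ∀ d ∈ sorted_differentials, 0 ≤ d.1 ∧ d.1 < 16

instance (sorted_differentials : List (Int × Int)) : Decidable (Pre_get_good_pair sorted_differentials) := by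
  unfold Pre_get_good_pair; infer_instance

def pvWitness_get_good_pair : (List (Int × Int)) := [(3, 200), (4, 2), (15, 15)]

def Spec_get_good_pair (sorted_differentials : List (Int × Int)) (out : Option (Int × Int)) : Prop := out = get_good_pair_alt sorted_differentials
instance (sorted_differentials : List (Int × Int)) (out : Option (Int × Int)) : Decidable (Spec_get_good_pair sorted_differentials out) := by unfold Spec_get_good_pair; infer_instance

-- ===== CLAIM (what is proved, stated in full; the proofs are below) =====
def Claim_equal_get_good_pair : Prop := ∀ (sorted_differentials : List (Int × Int)), Dom_get_good_pair sorted_differentials → Pre_get_good_pair sorted_differentials → Spec_get_good_pair sorted_differentials (get_good_pair sorted_differentials)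

-- ===== LEMMAS AND PROOFS =====

-- key fact: for a 4-bit input difference, A's 16-plaintext scan equals B's table lookup
-- the literal difference-distribution table (the value of tableB), established once by kernel evaluation
def tabLit : List ((Int × Int) × Int) := [((0, 0), 0),
  ((1, 3), 0),
  ((1, 13), 2),
  ((1, 12), 4),
  ((1, 10), 6),
  ((1, 7), 8),
  ((1, 9), 14),
  ((2, 7), 0),
  ((2, 9), 1),
  ((2, 5), 4),
  ((2, 3), 5),
  ((2, 14), 8),
  ((2, 6), 12),
  ((3, 10), 0),
  ((3, 4), 1),
  ((3, 15), 4),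
  ((3, 9), 5),
  ((3, 2), 8),
  ((3, 12), 13),
  ((4, 9), 0),
  ((4, 6), 1),
  ((4, 11), 2),
  ((4, 12), 3),
  ((4, 3), 10),
  ((5, 5), 0),
  ((5, 10), 1),
  ((5, 1), 2),
  ((5, 6), 3),
  ((5, 12), 9),
  ((5, 15), 11),
  ((6, 12), 0),
  ((6, 5), 1),
  ((6, 14), 2),
  ((6, 15), 3),
  ((6, 13), 8),
  ((6, 3), 9),
  ((7, 6), 0),
  ((7, 15), 1),
  ((7, 2), 2),
  ((7, 3), 3),
  ((7, 4), 8),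
  ((7, 10), 9),
  ((7, 9), 11),
  ((8, 15), 0),
  ((8, 11), 1),
  ((8, 6), 2),
  ((8, 7), 3),
  ((8, 13), 4),
  ((8, 14), 6),
  ((9, 8), 0),
  ((9, 12), 1),
  ((9, 10), 2),
  ((9, 11), 3),
  ((9, 7), 4),
  ((9, 1), 5),
  ((9, 4), 7),
  ((10, 1), 0),
  ((10, 14), 1),
  ((10, 8), 2),
  ((10, 2), 3),
  ((10, 11), 4),
  ((11, 13), 0),
  ((11, 2), 1),
  ((11, 15), 2),
  ((11, 5), 3),
  ((11, 7), 5),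
  ((12, 4), 0),
  ((12, 13), 1),
  ((12, 5), 2),
  ((12, 1), 3),
  ((12, 6), 4),
  ((12, 11), 7),
  ((13, 14), 0),
  ((13, 7), 1),
  ((13, 12), 2),
  ((13, 8), 3),
  ((13, 1), 4),
  ((13, 10), 5),
  ((14, 2), 0),
  ((14, 8), 1),
  ((14, 3), 2),
  ((14, 4), 3),
  ((14, 14), 7),
  ((15, 11), 0),
  ((15, 1), 1),
  ((15, 9), 2),
  ((15, 14), 3),
  ((15, 4), 4)]

def selB (d1 : Int) (e : Int × (Int × Int)) : Option (Int × Int) := if e.1 = d1 then some e.2 else none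

def rowFn (c p : Int) : Int × (Int × Int) :=
  (PySem.Int.bxor (encryptA p) (encryptA (PySem.Int.bxor p c)), (p, PySem.Int.bxor p c))

theorem htab : tableB = PySem.Dict.mk tabLit := by decide

theorem innerA_eq (c d1 : Int) :
    innerA c d1 = ((PySem.List.pyRange 0 16 1).map (rowFn c)).findSome? (selB d1) := by
  rw [innerA, List.findSome?_map]; rfl

theorem findSome?_selB_none (l : List (Int × (Int × Int))) (d1 : Int)
    (h : ∀ e ∈ l, 0 ≤ e.1 ∧ e.1 < 16) (hx : ¬ (0 ≤ d1 ∧ d1 < 16)) :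
    l.findSome? (selB d1) = none := by
  induction l with
  | nil => rfl
  | cons e t ih =>
    rw [List.findSome?_cons]
    have he := h e (List.mem_cons_self ..)
    have hsel : selB d1 e = none := by
      unfold selB; rw [if_neg]; intro hc; exact hx (by omega)
    rw [hsel]
    exact ih (fun x hx' => h x (List.mem_cons_of_mem _ hx'))

theorem get?_none_of (l : List ((Int × Int) × Int)) (x : Int × Int)
    (h : ∀ e ∈ l, 0 ≤ e.1.2 ∧ e.1.2 < 16) (hx : ¬ (0 ≤ x.2 ∧ x.2 < 16)) :
    (PySem.Dict.mk l).get? x = none := by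
  induction l with
  | nil => rfl
  | cons e t ih =>
    obtain ⟨k, v⟩ := e
    rw [PySem.Dict.get?_mk_cons]
    have hk : (k == x) = false := by
      apply beq_eq_false_iff_ne.mpr
      intro hkx
      exact hx (hkx ▸ h (k, v) (List.mem_cons_self ..))
    rw [hk, if_neg (by simp)]
    exact ih (fun e he => h e (List.mem_cons_of_mem _ he))


theorem key_0 (d1 : Int) :
    innerA 0 d1 = ((PySem.Dict.mk tabLit).get? (0, d1)).map (fun p => (p, PySem.Int.bxor p 0)) := by
  rw [innerA_eq]
  by_cases h : 0 ≤ d1 ∧ d1 < 16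
  · exact (by decide : ∀ x ∈ PySem.List.pyRange 0 16 1,
      ((PySem.List.pyRange 0 16 1).map (rowFn 0)).findSome? (selB x)
        = ((PySem.Dict.mk tabLit).get? (0, x)).map (fun p => (p, PySem.Int.bxor p 0)))
      d1 (PySem.List.mem_pyRange_one.mpr ⟨h.1, h.2⟩)
  · rw [findSome?_selB_none ((PySem.List.pyRange 0 16 1).map (rowFn 0)) d1 (by decide) h,
        get?_none_of tabLit (0, d1) (by decide) h]
    rfl


theorem key_1 (d1 : Int) :
    innerA 1 d1 = ((PySem.Dict.mk tabLit).get? (1, d1)).map (fun p => (p, PySem.Int.bxor p 1)) := by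
  rw [innerA_eq]
  by_cases h : 0 ≤ d1 ∧ d1 < 16
  · exact (by decide : ∀ x ∈ PySem.List.pyRange 0 16 1,
      ((PySem.List.pyRange 0 16 1).map (rowFn 1)).findSome? (selB x)
        = ((PySem.Dict.mk tabLit).get? (1, x)).map (fun p => (p, PySem.Int.bxor p 1)))
      d1 (PySem.List.mem_pyRange_one.mpr ⟨h.1, h.2⟩)
  · rw [findSome?_selB_none ((PySem.List.pyRange 0 16 1).map (rowFn 1)) d1 (by decide) h,
        get?_none_of tabLit (1, d1) (by decide) h]
    rfl


theorem key_2 (d1 : Int) :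
    innerA 2 d1 = ((PySem.Dict.mk tabLit).get? (2, d1)).map (fun p => (p, PySem.Int.bxor p 2)) := by
  rw [innerA_eq]
  by_cases h : 0 ≤ d1 ∧ d1 < 16
  · exact (by decide : ∀ x ∈ PySem.List.pyRange 0 16 1,
      ((PySem.List.pyRange 0 16 1).map (rowFn 2)).findSome? (selB x)
        = ((PySem.Dict.mk tabLit).get? (2, x)).map (fun p => (p, PySem.Int.bxor p 2)))
      d1 (PySem.List.mem_pyRange_one.mpr ⟨h.1, h.2⟩)
  · rw [findSome?_selB_none ((PySem.List.pyRange 0 16 1).map (rowFn 2)) d1 (by decide) h,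
        get?_none_of tabLit (2, d1) (by decide) h]
    rfl


theorem key_3 (d1 : Int) :
    innerA 3 d1 = ((PySem.Dict.mk tabLit).get? (3, d1)).map (fun p => (p, PySem.Int.bxor p 3)) := by
  rw [innerA_eq]
  by_cases h : 0 ≤ d1 ∧ d1 < 16
  · exact (by decide : ∀ x ∈ PySem.List.pyRange 0 16 1,
      ((PySem.List.pyRange 0 16 1).map (rowFn 3)).findSome? (selB x)
        = ((PySem.Dict.mk tabLit).get? (3, x)).map (fun p => (p, PySem.Int.bxor p 3)))
      d1 (PySem.List.mem_pyRange_one.mpr ⟨h.1, h.2⟩)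
  · rw [findSome?_selB_none ((PySem.List.pyRange 0 16 1).map (rowFn 3)) d1 (by decide) h,
        get?_none_of tabLit (3, d1) (by decide) h]
    rfl


theorem key_4 (d1 : Int) :
    innerA 4 d1 = ((PySem.Dict.mk tabLit).get? (4, d1)).map (fun p => (p, PySem.Int.bxor p 4)) := by
  rw [innerA_eq]
  by_cases h : 0 ≤ d1 ∧ d1 < 16
  · exact (by decide : ∀ x ∈ PySem.List.pyRange 0 16 1,
      ((PySem.List.pyRange 0 16 1).map (rowFn 4)).findSome? (selB x)
        = ((PySem.Dict.mk tabLit).get? (4, x)).map (fun p => (p, PySem.Int.bxor p 4)))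
      d1 (PySem.List.mem_pyRange_one.mpr ⟨h.1, h.2⟩)
  · rw [findSome?_selB_none ((PySem.List.pyRange 0 16 1).map (rowFn 4)) d1 (by decide) h,
        get?_none_of tabLit (4, d1) (by decide) h]
    rfl


theorem key_5 (d1 : Int) :
    innerA 5 d1 = ((PySem.Dict.mk tabLit).get? (5, d1)).map (fun p => (p, PySem.Int.bxor p 5)) := by
  rw [innerA_eq]
  by_cases h : 0 ≤ d1 ∧ d1 < 16
  · exact (by decide : ∀ x ∈ PySem.List.pyRange 0 16 1,
      ((PySem.List.pyRange 0 16 1).map (rowFn 5)).findSome? (selB x)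
        = ((PySem.Dict.mk tabLit).get? (5, x)).map (fun p => (p, PySem.Int.bxor p 5)))
      d1 (PySem.List.mem_pyRange_one.mpr ⟨h.1, h.2⟩)
  · rw [findSome?_selB_none ((PySem.List.pyRange 0 16 1).map (rowFn 5)) d1 (by decide) h,
        get?_none_of tabLit (5, d1) (by decide) h]
    rfl


theorem key_6 (d1 : Int) :
    innerA 6 d1 = ((PySem.Dict.mk tabLit).get? (6, d1)).map (fun p => (p, PySem.Int.bxor p 6)) := by
  rw [innerA_eq]
  by_cases h : 0 ≤ d1 ∧ d1 < 16
  · exact (by decide : ∀ x ∈ PySem.List.pyRange 0 16 1,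
      ((PySem.List.pyRange 0 16 1).map (rowFn 6)).findSome? (selB x)
        = ((PySem.Dict.mk tabLit).get? (6, x)).map (fun p => (p, PySem.Int.bxor p 6)))
      d1 (PySem.List.mem_pyRange_one.mpr ⟨h.1, h.2⟩)
  · rw [findSome?_selB_none ((PySem.List.pyRange 0 16 1).map (rowFn 6)) d1 (by decide) h,
        get?_none_of tabLit (6, d1) (by decide) h]
    rfl


theorem key_7 (d1 : Int) :
    innerA 7 d1 = ((PySem.Dict.mk tabLit).get? (7, d1)).map (fun p => (p, PySem.Int.bxor p 7)) := by
  rw [innerA_eq]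
  by_cases h : 0 ≤ d1 ∧ d1 < 16
  · exact (by decide : ∀ x ∈ PySem.List.pyRange 0 16 1,
      ((PySem.List.pyRange 0 16 1).map (rowFn 7)).findSome? (selB x)
        = ((PySem.Dict.mk tabLit).get? (7, x)).map (fun p => (p, PySem.Int.bxor p 7)))
      d1 (PySem.List.mem_pyRange_one.mpr ⟨h.1, h.2⟩)
  · rw [findSome?_selB_none ((PySem.List.pyRange 0 16 1).map (rowFn 7)) d1 (by decide) h,
        get?_none_of tabLit (7, d1) (by decide) h]
    rfl


theorem key_8 (d1 : Int) :
    innerA 8 d1 = ((PySem.Dict.mk tabLit).get? (8, d1)).map (fun p => (p, PySem.Int.bxor p 8)) := by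
  rw [innerA_eq]
  by_cases h : 0 ≤ d1 ∧ d1 < 16
  · exact (by decide : ∀ x ∈ PySem.List.pyRange 0 16 1,
      ((PySem.List.pyRange 0 16 1).map (rowFn 8)).findSome? (selB x)
        = ((PySem.Dict.mk tabLit).get? (8, x)).map (fun p => (p, PySem.Int.bxor p 8)))
      d1 (PySem.List.mem_pyRange_one.mpr ⟨h.1, h.2⟩)
  · rw [findSome?_selB_none ((PySem.List.pyRange 0 16 1).map (rowFn 8)) d1 (by decide) h,
        get?_none_of tabLit (8, d1) (by decide) h]
    rfl


theorem key_9 (d1 : Int) :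
    innerA 9 d1 = ((PySem.Dict.mk tabLit).get? (9, d1)).map (fun p => (p, PySem.Int.bxor p 9)) := by
  rw [innerA_eq]
  by_cases h : 0 ≤ d1 ∧ d1 < 16
  · exact (by decide : ∀ x ∈ PySem.List.pyRange 0 16 1,
      ((PySem.List.pyRange 0 16 1).map (rowFn 9)).findSome? (selB x)
        = ((PySem.Dict.mk tabLit).get? (9, x)).map (fun p => (p, PySem.Int.bxor p 9)))
      d1 (PySem.List.mem_pyRange_one.mpr ⟨h.1, h.2⟩)
  · rw [findSome?_selB_none ((PySem.List.pyRange 0 16 1).map (rowFn 9)) d1 (by decide) h,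
        get?_none_of tabLit (9, d1) (by decide) h]
    rfl


theorem key_10 (d1 : Int) :
    innerA 10 d1 = ((PySem.Dict.mk tabLit).get? (10, d1)).map (fun p => (p, PySem.Int.bxor p 10)) := by
  rw [innerA_eq]
  by_cases h : 0 ≤ d1 ∧ d1 < 16
  · exact (by decide : ∀ x ∈ PySem.List.pyRange 0 16 1,
      ((PySem.List.pyRange 0 16 1).map (rowFn 10)).findSome? (selB x)
        = ((PySem.Dict.mk tabLit).get? (10, x)).map (fun p => (p, PySem.Int.bxor p 10)))
      d1 (PySem.List.mem_pyRange_one.mpr ⟨h.1, h.2⟩)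
  · rw [findSome?_selB_none ((PySem.List.pyRange 0 16 1).map (rowFn 10)) d1 (by decide) h,
        get?_none_of tabLit (10, d1) (by decide) h]
    rfl


theorem key_11 (d1 : Int) :
    innerA 11 d1 = ((PySem.Dict.mk tabLit).get? (11, d1)).map (fun p => (p, PySem.Int.bxor p 11)) := by
  rw [innerA_eq]
  by_cases h : 0 ≤ d1 ∧ d1 < 16
  · exact (by decide : ∀ x ∈ PySem.List.pyRange 0 16 1,
      ((PySem.List.pyRange 0 16 1).map (rowFn 11)).findSome? (selB x)
        = ((PySem.Dict.mk tabLit).get? (11, x)).map (fun p => (p, PySem.Int.bxor p 11)))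
      d1 (PySem.List.mem_pyRange_one.mpr ⟨h.1, h.2⟩)
  · rw [findSome?_selB_none ((PySem.List.pyRange 0 16 1).map (rowFn 11)) d1 (by decide) h,
        get?_none_of tabLit (11, d1) (by decide) h]
    rfl


theorem key_12 (d1 : Int) :
    innerA 12 d1 = ((PySem.Dict.mk tabLit).get? (12, d1)).map (fun p => (p, PySem.Int.bxor p 12)) := by
  rw [innerA_eq]
  by_cases h : 0 ≤ d1 ∧ d1 < 16
  · exact (by decide : ∀ x ∈ PySem.List.pyRange 0 16 1,
      ((PySem.List.pyRange 0 16 1).map (rowFn 12)).findSome? (selB x)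
        = ((PySem.Dict.mk tabLit).get? (12, x)).map (fun p => (p, PySem.Int.bxor p 12)))
      d1 (PySem.List.mem_pyRange_one.mpr ⟨h.1, h.2⟩)
  · rw [findSome?_selB_none ((PySem.List.pyRange 0 16 1).map (rowFn 12)) d1 (by decide) h,
        get?_none_of tabLit (12, d1) (by decide) h]
    rfl


theorem key_13 (d1 : Int) :
    innerA 13 d1 = ((PySem.Dict.mk tabLit).get? (13, d1)).map (fun p => (p, PySem.Int.bxor p 13)) := by
  rw [innerA_eq]
  by_cases h : 0 ≤ d1 ∧ d1 < 16
  · exact (by decide : ∀ x ∈ PySem.List.pyRange 0 16 1,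
      ((PySem.List.pyRange 0 16 1).map (rowFn 13)).findSome? (selB x)
        = ((PySem.Dict.mk tabLit).get? (13, x)).map (fun p => (p, PySem.Int.bxor p 13)))
      d1 (PySem.List.mem_pyRange_one.mpr ⟨h.1, h.2⟩)
  · rw [findSome?_selB_none ((PySem.List.pyRange 0 16 1).map (rowFn 13)) d1 (by decide) h,
        get?_none_of tabLit (13, d1) (by decide) h]
    rfl


theorem key_14 (d1 : Int) :
    innerA 14 d1 = ((PySem.Dict.mk tabLit).get? (14, d1)).map (fun p => (p, PySem.Int.bxor p 14)) := by
  rw [innerA_eq]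
  by_cases h : 0 ≤ d1 ∧ d1 < 16
  · exact (by decide : ∀ x ∈ PySem.List.pyRange 0 16 1,
      ((PySem.List.pyRange 0 16 1).map (rowFn 14)).findSome? (selB x)
        = ((PySem.Dict.mk tabLit).get? (14, x)).map (fun p => (p, PySem.Int.bxor p 14)))
      d1 (PySem.List.mem_pyRange_one.mpr ⟨h.1, h.2⟩)
  · rw [findSome?_selB_none ((PySem.List.pyRange 0 16 1).map (rowFn 14)) d1 (by decide) h,
        get?_none_of tabLit (14, d1) (by decide) h]
    rfl


theorem key_15 (d1 : Int) :
    innerA 15 d1 = ((PySem.Dict.mk tabLit).get? (15, d1)).map (fun p => (p, PySem.Int.bxor p 15)) := by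
  rw [innerA_eq]
  by_cases h : 0 ≤ d1 ∧ d1 < 16
  · exact (by decide : ∀ x ∈ PySem.List.pyRange 0 16 1,
      ((PySem.List.pyRange 0 16 1).map (rowFn 15)).findSome? (selB x)
        = ((PySem.Dict.mk tabLit).get? (15, x)).map (fun p => (p, PySem.Int.bxor p 15)))
      d1 (PySem.List.mem_pyRange_one.mpr ⟨h.1, h.2⟩)
  · rw [findSome?_selB_none ((PySem.List.pyRange 0 16 1).map (rowFn 15)) d1 (by decide) h,
        get?_none_of tabLit (15, d1) (by decide) h]
    rfl


theorem innerA_eq_lookup (d0 d1 : Int) (h0 : 0 ≤ d0) (h1 : d0 < 16) :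
    innerA d0 d1 = (tableB.get? (d0, d1)).map (fun p => (p, PySem.Int.bxor p d0)) := by
  rw [htab]
  interval_cases d0
  · exact key_0 d1
  · exact key_1 d1
  · exact key_2 d1
  · exact key_3 d1
  · exact key_4 d1
  · exact key_5 d1
  · exact key_6 d1
  · exact key_7 d1
  · exact key_8 d1
  · exact key_9 d1
  · exact key_10 d1
  · exact key_11 d1
  · exact key_12 d1
  · exact key_13 d1
  · exact key_14 d1
  · exact key_15 d1

-- ===== VERDICT (by name: the statement is the Claim_ definition above) =====
theorem get_good_pair_spec : Claim_equal_get_good_pair := by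
  intro l hdom hpre
  unfold Spec_get_good_pair
  induction l with
  | nil => rfl
  | cons d rest ih =>
    have hd := hpre d (List.mem_cons_self ..)
    rw [get_good_pair, get_good_pair_alt, List.findSome?_cons,
        innerA_eq_lookup d.1 d.2 hd.1 hd.2]
    cases htb : tableB.get? (d.1, d.2) with
    | some p => simp
    | none =>
      simp only [Option.map_none]
      have hdr : Dom_get_good_pair rest := by
        unfold Dom_get_good_pair at hdom ⊢; simp only [List.all_cons, Bool.and_eq_true] at hdom; exact hdom.2
      exact (ih hdr (fun x hx => hpre x (List.mem_cons_of_mem _ hx))).trans (by rw [get_good_pair_alt])
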